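-- pv_equiv track=rewrite | github.com/Megumin6626/GOSE_VMK | GOSE_VMK_avi_ffmpge.py | suggest_closest_date
-- ===== SOURCE A (Python) =====
-- def suggest_closest_date(image_list, start_date_part, end_date_part):
--     def extract_date_from_filename(filename):
--         return filename.split('-')[0]
--
--     image_list = sorted(image_list, key=extract_date_from_filename)
--
--     closest_start_date = None
--     closest_end_date = None
--
--     for image in image_list:
--         image_date = extract_date_from_filename(image)
--         if image_date <= start_date_part:
--             closest_start_date = image
--         if image_date <= end_date_part:
--             closest_end_date = image
--
--     return closest_start_date, closest_end_date
-- ===== SOURCE B (Python) =====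
-- def suggest_closest_date(image_list, start_date_part, end_date_part):
--     def key(filename):
--         return filename.split('-')[0]
--
--     images = sorted(image_list, key=key)
--     keys = [key(f) for f in images]
--     n = len(keys)
--
--     def pick(threshold):
--         # bisect_right by hand: index of the first key > threshold
--         lo, hi = 0, n
--         while lo < hi:
--             mid = (lo + hi) // 2
--             if threshold < keys[mid]:
--                 hi = mid
--             else:
--                 lo = mid + 1
--         return images[lo - 1] if lo > 0 else None
--
--     return pick(start_date_part), pick(end_date_part)
-- ===== Notes on version B (the rewrite author's own statement) =====
-- stated objective: alternative
-- what changed: Replaces A's per-threshold linear scan over the sorted list with a hand-written bisect_right binary search over the parallel key list, indexing images[idx-1] (or None when idx==0) for each threshold.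
import Mathlib
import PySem

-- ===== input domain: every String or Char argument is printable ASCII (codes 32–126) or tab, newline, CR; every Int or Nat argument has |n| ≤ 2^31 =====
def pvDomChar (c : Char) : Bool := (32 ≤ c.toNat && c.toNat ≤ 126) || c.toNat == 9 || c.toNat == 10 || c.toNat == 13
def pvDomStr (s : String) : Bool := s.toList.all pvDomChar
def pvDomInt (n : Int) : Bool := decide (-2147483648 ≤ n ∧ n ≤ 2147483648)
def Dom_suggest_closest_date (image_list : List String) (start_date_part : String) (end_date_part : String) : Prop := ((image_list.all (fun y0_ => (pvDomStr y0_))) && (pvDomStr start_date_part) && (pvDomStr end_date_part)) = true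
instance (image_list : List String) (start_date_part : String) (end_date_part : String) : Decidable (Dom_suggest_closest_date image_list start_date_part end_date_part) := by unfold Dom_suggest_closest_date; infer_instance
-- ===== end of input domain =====

-- B replaces A's per-threshold linear scan over the sorted list by a hand-written
-- bisect_right binary search over the parallel key list (alternative algorithm, same sort).

-- ===== PORT A =====
-- filename.split('-')[0]: split with a nonempty separator always returns a nonempty
-- list, so the two defaults below are never taken — exact.
def pvKey (filename : String) : String :=
  ((PySem.Str.split? filename "-").getD []).headD ""

def suggest_closest_date (image_list : List String) (start_date_part : String) (end_date_part : String) : Option String × Option String :=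
  let xs := PySem.List.sorted image_list pvKey
  xs.foldl
    (fun (acc : Option String × Option String) image =>
      let image_date := pvKey image
      (if image_date ≤ start_date_part then some image else acc.1,
       if image_date ≤ end_date_part then some image else acc.2))
    (none, none)

-- ===== PORT B =====
-- the 'while lo < hi' loop of Source B's pick; fuel = hi - lo makes it total (initial
-- fuel n suffices).  keys[mid] is in range whenever taken (lo ≤ mid < hi ≤ n), so
-- getD's default is never used — exact.
def pvBisect (ks : List String) (t : String) : Nat → Nat → Nat → Nat
  | 0, lo, _ => lo
  | fuel + 1, lo, hi =>
    if lo < hi then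
      let mid := (lo + hi) / 2
      if t < ks.getD mid "" then pvBisect ks t fuel lo mid
      else pvBisect ks t fuel (mid + 1) hi
    else lo

-- 'images[lo - 1] if lo > 0 else None'; the index is in range whenever lo > 0, so
-- getElem? yields some — exact.
def pvPick (images ks : List String) (t : String) : Option String :=
  let lo := pvBisect ks t ks.length 0 ks.length
  if 0 < lo then images[lo - 1]? else none

def suggest_closest_date_alt (image_list : List String) (start_date_part : String) (end_date_part : String) : Option String × Option String :=
  let images := PySem.List.sorted image_list pvKey
  let ks := images.map pvKey
  (pvPick images ks start_date_part, pvPick images ks end_date_part)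

-- ===== PRECONDITION & SPEC =====
def Spec_suggest_closest_date (image_list : List String) (start_date_part : String) (end_date_part : String) (out : Option String × Option String) : Prop := out = suggest_closest_date_alt image_list start_date_part end_date_part
instance (image_list : List String) (start_date_part : String) (end_date_part : String) (out : Option String × Option String) : Decidable (Spec_suggest_closest_date image_list start_date_part end_date_part out) := by unfold Spec_suggest_closest_date; infer_instance

-- ===== CLAIM (what is proved, stated in full; the proofs are below) =====
def Claim_equal_suggest_closest_date : Prop := ∀ (image_list : List String) (start_date_part : String) (end_date_part : String), Dom_suggest_closest_date image_list start_date_part end_date_part → Spec_suggest_closest_date image_list start_date_part end_date_part (suggest_closest_date image_list start_date_part end_date_part)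

-- ===== LEMMAS AND PROOFS =====

-- a foldl over a pair whose components evolve independently splits into two foldls
theorem pv_foldl_pair {α β γ : Type} (l : List α) (F : β × γ → α → β × γ)
    (f : β → α → β) (g : γ → α → γ)
    (hF : ∀ acc x, F acc x = (f acc.1 x, g acc.2 x)) (a : β) (b : γ) :
    l.foldl F (a, b) = (l.foldl f a, l.foldl g b) := by
  induction l generalizing a b with
  | nil => rfl
  | cons x l ih => simp only [List.foldl_cons, hF]; exact ih _ _

-- the last-match fold when every element matches: the last element (or acc if none)
theorem pv_foldl_if_all_true {α : Type} (p : α → Prop) [DecidablePred p]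
    (l : List α) (acc : Option α) (h : ∀ x ∈ l, p x) :
    l.foldl (fun a x => if p x then some x else a) acc = l.getLast?.or acc := by
  induction l generalizing acc with
  | nil => rfl
  | cons x l ih =>
    simp only [List.foldl_cons, if_pos (h x (List.mem_cons_self))]
    rw [ih _ (fun y hy => h y (List.mem_cons_of_mem _ hy))]
    cases l with
    | nil => rfl
    | cons y l =>
      rw [List.getLast?_cons_cons]
      cases hg : (y :: l).getLast? with
      | none => simp at hg
      | some v => simp

-- the last-match fold when no element matches: acc unchanged
theorem pv_foldl_if_all_false {α : Type} (p : α → Prop) [DecidablePred p]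
    (l : List α) (acc : Option α) (h : ∀ x ∈ l, ¬ p x) :
    l.foldl (fun a x => if p x then some x else a) acc = acc := by
  induction l generalizing acc with
  | nil => rfl
  | cons x l ih =>
    simp only [List.foldl_cons, if_neg (h x (List.mem_cons_self))]
    exact ih _ (fun y hy => h y (List.mem_cons_of_mem _ hy))

-- the last-match fold, when the matches are exactly the first r positions
theorem pv_foldl_if_split {α : Type} (p : α → Prop) [DecidablePred p]
    (xs : List α) (r : Nat) (hr : r ≤ xs.length)
    (h1 : ∀ (j : Nat) (hj : j < xs.length), j < r → p xs[j])
    (h2 : ∀ (j : Nat) (hj : j < xs.length), r ≤ j → ¬ p xs[j]) :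
    xs.foldl (fun a x => if p x then some x else a) none
      = if 0 < r then xs[r - 1]? else none := by
  conv_lhs => rw [← List.take_append_drop r xs]
  rw [List.foldl_append]
  rw [pv_foldl_if_all_true p _ none (by
    intro x hx
    rw [List.mem_iff_getElem] at hx
    obtain ⟨i, hi, rfl⟩ := hx
    have hi' : i < r := lt_of_lt_of_le hi (by simp)
    rw [List.getElem_take]
    exact h1 i (lt_of_lt_of_le hi' hr) hi')]
  rw [pv_foldl_if_all_false p _ _ (by
    intro x hx
    rw [List.mem_iff_getElem] at hx
    obtain ⟨i, hi, rfl⟩ := hx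
    have hi' : r + i < xs.length := by simp [List.length_drop] at hi; omega
    rw [List.getElem_drop]
    exact h2 (r + i) hi' (Nat.le_add_right _ _))]
  rcases Nat.eq_zero_or_pos r with h0 | h0
  · subst h0; simp
  · rw [if_pos h0, List.getLast?_eq_getElem?, Option.or_none]
    have hlen : (xs.take r).length = r := by simp [Nat.min_eq_left hr]
    rw [hlen, List.getElem?_take, if_pos (by omega : r - 1 < r)]

-- specification of the binary-search loop on a key list sorted ≤
theorem pvBisect_spec (ks : List String) (t : String)
    (hpw : ks.Pairwise (· ≤ ·)) :
    ∀ (fuel lo hi : Nat), lo ≤ hi → hi ≤ ks.length → hi - lo ≤ fuel →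
    (∀ (j : Nat) (hj : j < ks.length), j < lo → ks[j] ≤ t) →
    (∀ (j : Nat) (hj : j < ks.length), hi ≤ j → t < ks[j]) →
    lo ≤ pvBisect ks t fuel lo hi ∧ pvBisect ks t fuel lo hi ≤ hi ∧
    (∀ (j : Nat) (hj : j < ks.length), j < pvBisect ks t fuel lo hi → ks[j] ≤ t) ∧
    (∀ (j : Nat) (hj : j < ks.length), pvBisect ks t fuel lo hi ≤ j → t < ks[j]) := by
  have hmono : ∀ (i j : Nat) (hi : i < ks.length) (hj : j < ks.length), i ≤ j → ks[i] ≤ ks[j] := by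
    intro i j hi hj hij
    rcases Nat.lt_or_ge i j with h | h
    · exact (List.pairwise_iff_getElem.mp hpw) i j hi hj h
    · have : i = j := le_antisymm hij h
      subst this; exact le_refl _
  intro fuel
  induction fuel with
  | zero =>
    intro lo hi hlohi hhi hfuel hlow hhigh
    have : lo = hi := by omega
    subst this
    exact ⟨le_refl _, le_refl _, fun j hj hjlt => hlow j hj hjlt,
      fun j hj hjge => hhigh j hj hjge⟩
  | succ fuel ih =>
    intro lo hi hlohi hhi hfuel hlow hhigh
    rw [pvBisect]
    by_cases hlh : lo < hi
    · rw [if_pos hlh]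
      have hmid1 : lo ≤ (lo + hi) / 2 := by omega
      have hmid2 : (lo + hi) / 2 < hi := by omega
      have hmidlen : (lo + hi) / 2 < ks.length := lt_of_lt_of_le hmid2 hhi
      have hgetD : ks.getD ((lo + hi) / 2) "" = ks[(lo + hi) / 2] := by
        rw [List.getD_eq_getElem?_getD, List.getElem?_eq_getElem hmidlen]; rfl
      by_cases hcmp : t < ks.getD ((lo + hi) / 2) ""
      · rw [if_pos hcmp]
        refine (ih lo ((lo + hi) / 2) hmid1 (le_of_lt (lt_of_lt_of_le hmid2 hhi)) (by omega) hlow ?_).imp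
          id (fun h => ⟨le_trans h.1 (le_of_lt hmid2), h.2⟩)
        intro j hj hjge
        calc t < ks[(lo + hi) / 2] := by rwa [hgetD] at hcmp
          _ ≤ ks[j] := hmono _ _ hmidlen hj hjge
      · rw [if_neg hcmp]
        refine (ih ((lo + hi) / 2 + 1) hi (by omega) hhi (by omega) ?_ hhigh).imp
          (fun h => le_trans (by omega) h) id
        intro j hj hjlt
        have hjle : j ≤ (lo + hi) / 2 := by omega
        calc ks[j] ≤ ks[(lo + hi) / 2] := hmono _ _ hj hmidlen hjle
          _ ≤ t := by rw [hgetD] at hcmp; exact le_of_not_gt hcmp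
    · rw [if_neg hlh]
      have : lo = hi := by omega
      subst this
      exact ⟨le_refl _, le_refl _, fun j hj hjlt => hlow j hj hjlt,
        fun j hj hjge => hhigh j hj hjge⟩

-- one component: the last-match fold over the sorted list equals the bisect pick
theorem pv_component_eq (image_list : List String) (t : String) :
    (PySem.List.sorted image_list pvKey).foldl
      (fun a x => if pvKey x ≤ t then some x else a) none
      = pvPick (PySem.List.sorted image_list pvKey)
          ((PySem.List.sorted image_list pvKey).map pvKey) t := by
  set xs := PySem.List.sorted image_list pvKey with hxs
  set ks := xs.map pvKey with hks
  have hlen : ks.length = xs.length := by simp [hks]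
  have hpw : ks.Pairwise (· ≤ ·) := by
    rw [hks, hxs]; exact PySem.List.sorted_map_key_pairwise image_list pvKey
  obtain ⟨h0, h1, h2, h3⟩ :=
    pvBisect_spec ks t hpw ks.length 0 ks.length (Nat.zero_le _) (le_refl _)
      (by omega) (fun j hj hjlt => absurd hjlt (Nat.not_lt_zero j))
      (fun j hj hjge => absurd hj (by omega))
  set r := pvBisect ks t ks.length 0 ks.length with hr
  have hkget : ∀ (j : Nat) (hj : j < xs.length), ks[j]'(by omega) = pvKey xs[j] := by
    intro j hj; simp [hks]
  rw [pv_foldl_if_split (fun x => pvKey x ≤ t) xs r (by omega)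
    (fun j hj hjr => by show pvKey xs[j] ≤ t; rw [← hkget j hj]; exact h2 j (by omega) hjr)
    (fun j hj hjr => by show ¬ pvKey xs[j] ≤ t; rw [← hkget j hj]; exact not_le_of_gt (h3 j (by omega) hjr))]
  rfl

-- ===== VERDICT (by name: the statement is the Claim_ definition above) =====
theorem suggest_closest_date_spec : Claim_equal_suggest_closest_date := by
  intro image_list start_date_part end_date_part _
  unfold Spec_suggest_closest_date suggest_closest_date suggest_closest_date_alt
  rw [pv_foldl_pair _ _
    (fun a x => if pvKey x ≤ start_date_part then some x else a)
    (fun a x => if pvKey x ≤ end_date_part then some x else a)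
    (fun acc x => rfl)]
  rw [pv_component_eq, pv_component_eq]
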